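-- pv_equiv track=rewrite | github.com/sht3898/Algorithm | Programmer/level1/하샤드수.py | solution
-- ===== SOURCE A (Python) =====
-- def solution(x):
--     answer = False
--     number = x
--     num_list = []
--     while x > 0:
--         num_list.append(x%10)
--         x //= 10
--     if number % sum(num_list) == 0:
--         answer = True
--     return answer
-- ===== SOURCE B (Python) =====
-- def solution(x):
--     return x % sum(int(c) for c in str(x)) == 0
-- ===== Notes on version B (the rewrite author's own statement) =====
-- stated objective: idiomatic
-- what changed: B computes the digit sum by traversing str(x) and summing int(c) per character in one expression, replacing A's %10///10 while-loop that materialises a digit list; the divisibility test is a single return.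
import Mathlib
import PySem

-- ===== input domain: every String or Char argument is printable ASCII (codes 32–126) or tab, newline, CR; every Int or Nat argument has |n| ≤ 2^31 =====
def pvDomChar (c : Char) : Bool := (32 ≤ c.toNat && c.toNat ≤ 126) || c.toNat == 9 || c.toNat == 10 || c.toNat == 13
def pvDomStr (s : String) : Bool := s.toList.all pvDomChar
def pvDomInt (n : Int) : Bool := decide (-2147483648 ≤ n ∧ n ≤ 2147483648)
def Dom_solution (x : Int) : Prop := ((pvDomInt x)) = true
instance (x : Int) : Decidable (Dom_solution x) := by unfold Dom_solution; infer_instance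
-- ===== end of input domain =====

-- B changes the digit-sum computation from A's %10 / //10 while-loop over an explicit list to a
-- one-pass sum over the characters of str(x) (objective: idiomatic).

-- ===== PORT A =====
-- the while loop: num_list.append(x % 10); x //= 10
def solLoopA (x : Int) (acc : List Int) : List Int :=
  if 0 < x then
    solLoopA (PySem.Int.floordiv x 10) (acc ++ [PySem.Int.mod x 10])
  else acc
termination_by x.toNat
decreasing_by
  rw [PySem.Int.floordiv_eq_ediv_of_pos (by norm_num)]
  omega

def solution (x : Int) : Bool :=
  let number := x
  let num_list := solLoopA x []
  -- Python raises ZeroDivisionError when num_list.sum = 0 (x ≤ 0); excluded by Pre_solution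
  decide (PySem.Int.mod number num_list.sum = 0)

-- ===== PORT B =====
-- int(c) is PySem.Int.ofChars? [c]; the getD 0 default is only reached where Python B raises
-- ValueError (x < 0, outside Pre_solution)
def solution_alt (x : Int) : Bool :=
  decide (PySem.Int.mod x
    (((PySem.Int.toChars x).map (fun c => (PySem.Int.ofChars? [c]).getD 0)).sum) = 0)

-- ===== PRECONDITION & SPEC =====
-- A raises ZeroDivisionError for x ≤ 0 (empty digit list, sum 0)
def Pre_solution (x : Int) : Prop := 0 < x
instance (x : Int) : Decidable (Pre_solution x) := by unfold Pre_solution; infer_instance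
def pvWitness_solution : Int := (18)

def Spec_solution (x : Int) (out : Bool) : Prop := out = solution_alt x
instance (x : Int) (out : Bool) : Decidable (Spec_solution x out) := by unfold Spec_solution; infer_instance

-- ===== CLAIM (what is proved, stated in full; the proofs are below) =====
def Claim_equal_solution : Prop := ∀ (x : Int), Dom_solution x → Pre_solution x → Spec_solution x (solution x)

-- ===== LEMMAS AND PROOFS =====

-- A's loop sum is the base-10 digit sum
lemma solLoopA_sum (n : Nat) : ∀ (x : Int) (acc : List Int), x.toNat = n → 0 < x →
    (solLoopA x acc).sum = acc.sum + ((Nat.digits 10 x.toNat).sum : Int) := by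
  induction n using Nat.strong_induction_on with
  | _ n ih =>
    intro x acc hn hx
    rw [solLoopA, if_pos hx]
    have h10 : (0:Int) < 10 := by norm_num
    rw [PySem.Int.floordiv_eq_ediv_of_pos h10, PySem.Int.mod_eq_emod_of_pos h10]
    have hdig : Nat.digits 10 x.toNat = x.toNat % 10 :: Nat.digits 10 (x.toNat / 10) :=
      Nat.digits_def' (by norm_num) (by omega)
    have hmod : x % 10 = ((x.toNat % 10 : Nat) : Int) := by omega
    have hdiv : x / 10 = ((x.toNat / 10 : Nat) : Int) := by omega
    by_cases hq : 0 < x / 10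
    · have hlt : (x / 10).toNat < n := by omega
      rw [ih _ hlt _ _ rfl hq]
      have hq' : (x / 10).toNat = x.toNat / 10 := by omega
      rw [hdig, hq', List.sum_append]
      simp [hmod]
      ring
    · rw [solLoopA, if_neg hq]
      have hz : x.toNat / 10 = 0 := by omega
      rw [hdig, hz, List.sum_append]
      simp [hmod]

-- int(c) reads back the digit character
lemma ofChars_digitChar (d : Nat) (hd : d < 10) :
    (PySem.Int.ofChars? [Nat.digitChar d]).getD 0 = (d : Int) := by
  interval_cases d <;> decide

-- Nat.toDigits is the reversed digit list rendered with digitChar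
lemma toDigitsCore_eq (f : Nat) : ∀ (m : Nat) (l : List Char), 0 < m → m < 10 ^ f →
    Nat.toDigitsCore 10 f m l = ((Nat.digits 10 m).reverse.map Nat.digitChar) ++ l := by
  induction f with
  | zero => intro m l hm hlt; omega
  | succ f ih =>
    intro m l hm hlt
    rw [Nat.toDigitsCore]
    have hdig : Nat.digits 10 m = m % 10 :: Nat.digits 10 (m / 10) :=
      Nat.digits_def' (by norm_num) hm
    by_cases hq : m / 10 = 0
    · rw [if_pos hq, hdig, hq]
      simp
    · rw [if_neg hq, ih (m / 10) _ (by omega) (by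
        have := Nat.div_lt_self hm (by norm_num : 1 < 10)
        calc m / 10 < 10 ^ (f+1) / 10 := by
              apply Nat.div_lt_div_of_lt_of_dvd ⟨10 ^ f, by ring⟩ hlt
          _ = 10 ^ f := by
              rw [pow_succ]
              exact Nat.mul_div_cancel _ (by norm_num)
              )]
      simp [hdig]

lemma toDigits_eq (m : Nat) (hm : 0 < m) :
    Nat.toDigits 10 m = (Nat.digits 10 m).reverse.map Nat.digitChar := by
  rw [Nat.toDigits, toDigitsCore_eq (m+1) m [] hm (by
    calc m < 10 ^ m := Nat.lt_pow_self (by norm_num)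
      _ ≤ 10 ^ (m+1) := Nat.pow_le_pow_right (by norm_num) (by omega)), List.append_nil]

-- B's char sum is the base-10 digit sum
lemma alt_sum (x : Int) (hx : 0 < x) :
    (((PySem.Int.toChars x).map (fun c => (PySem.Int.ofChars? [c]).getD 0)).sum)
      = ((Nat.digits 10 x.toNat).sum : Int) := by
  rw [PySem.Int.toChars, if_neg (by omega), toDigits_eq x.toNat (by omega)]
  rw [List.map_map]
  have hmap : ((Nat.digits 10 x.toNat).reverse.map
      ((fun c => (PySem.Int.ofChars? [c]).getD 0) ∘ Nat.digitChar))
      = (Nat.digits 10 x.toNat).reverse.map (fun d : Nat => (d : Int)) := by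
    apply List.map_congr_left
    intro d hd
    have : d < 10 := Nat.digits_lt_base (by norm_num) (List.mem_reverse.mp hd)
    exact ofChars_digitChar d this
  rw [hmap]
  simp

-- ===== VERDICT (by name: the statement is the Claim_ definition above) =====
theorem solution_spec : Claim_equal_solution := by
  intro x _ hpre
  unfold Spec_solution
  simp only [solution, solution_alt]
  rw [alt_sum x hpre, solLoopA_sum x.toNat x [] rfl hpre]
  simp
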